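-- pv_equiv track=rewrite | github.com/Ravi-0412/DSA-Program-And-Notes | Queue/FInd Winner in KnockOut Tournament.py | is_valid_draw
-- ===== SOURCE A (Python) =====
-- from collections import deque
--
-- def is_valid_draw(nums):
--     n = len(nums)
--     # Tournament must have a power of 2 players (2, 4, 8, 16...)
--     # Logic: If it's not even or power of 2, the pairing logic breaks.
--     if n == 0 or (n & (n - 1)) != 0:
--         return False
--     # Initialize queue with the starting draw
--     queue = deque(nums)
--     while len(queue) > 1:
--         current_round_size = len(queue)
--         # In each round, we process pairs
--         # We use current_round_size // 2 because each match takes 2 players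
--         for _ in range(current_round_size // 2):
--             player1 = queue.popleft()
--             player2 = queue.popleft()
--             # The "Valid Draw" Invariant:
--             # The sum of two opponents must be (Number of players in this round + 1)
--             # Example (N=8): 1+8=9, 2+7=9, 3+6=9, 4+5=9.
--             if player1 + player2 != current_round_size + 1:
--                 return False
--             # The winner (smaller rank) advances to the next level
--             queue.append(min(player1, player2))
--     return True
-- ===== SOURCE B (Python) =====
-- def is_valid_draw(nums):
--     n = len(nums)
--     # Tournament must have a power of 2 players (2, 4, 8, 16...)
--     if n == 0 or (n & (n - 1)) != 0:
--         return False
--     # Check the draw invariant level by level on the original array: the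
--     # player reaching the round with blocks of size h from a block is that
--     # block's minimum, so adjacent h-block minima must sum to n//h + 1.
--     h = 1
--     while h < n:
--         m = n // h  # number of players in the round with block size h
--         j = 0
--         while j < n:
--             if min(nums[j:j+h]) + min(nums[j+h:j+2*h]) != m + 1:
--                 return False
--             j += 2 * h
--         h *= 2
--     return True
-- ===== Notes on version B (the rewrite author's own statement) =====
-- stated objective: alternative
-- what changed: Replaces the deque round-by-round simulation with a direct check of the per-level invariant on the original array: at every block size h, adjacent block minima must sum to n//h + 1.
import Mathlib
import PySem

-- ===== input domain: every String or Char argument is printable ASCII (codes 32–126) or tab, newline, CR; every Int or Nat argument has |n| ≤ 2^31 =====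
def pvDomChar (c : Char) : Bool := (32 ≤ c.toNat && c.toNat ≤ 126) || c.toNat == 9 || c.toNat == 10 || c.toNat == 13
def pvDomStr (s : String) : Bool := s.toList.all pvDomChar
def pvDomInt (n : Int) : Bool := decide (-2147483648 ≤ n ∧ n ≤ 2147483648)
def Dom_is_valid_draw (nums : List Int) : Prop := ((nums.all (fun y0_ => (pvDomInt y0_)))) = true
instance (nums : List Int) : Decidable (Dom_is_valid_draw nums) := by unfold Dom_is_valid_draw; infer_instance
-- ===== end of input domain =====

-- B checks the per-level block-minima invariant directly on the original array instead of A's deque round simulation; alternative algorithm, same results.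


-- ===== PORT A =====
-- A's inner `for _ in range(current_round_size // 2)` loop: pops two players off the
-- front of the queue, checks their sum, appends the winner to the back; `none` = early
-- `return False`.  The `| _+1, _ =>` arm (queue shorter than 2) is unreachable: the
-- counter is len/2, so the queue always holds ≥ 2 elements when it fires.
def pvRoundA (s : Int) : Nat → List Int → Option (List Int)
  | 0, q => some q
  | k + 1, p1 :: p2 :: rest =>
      if p1 + p2 ≠ s then none
      else pvRoundA s k (rest ++ [min p1 p2])
  | _ + 1, _ => none

-- A's `while len(queue) > 1` loop; fuel = initial length, which exceeds the number of
-- rounds (log₂ n), so the fuel-0 arm is unreachable.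
def pvWhileA : Nat → List Int → Bool
  | 0, _ => true
  | fuel + 1, q =>
      if q.length > 1 then
        match pvRoundA ((q.length : Int) + 1) (q.length / 2) q with
        | none => false
        | some q' => pvWhileA fuel q'
      else true

def is_valid_draw (nums : List Int) : Bool :=
  if nums.length = 0 ∨ nums.length &&& (nums.length - 1) ≠ 0 then false
  else pvWhileA nums.length nums

-- ===== PORT B =====
-- min(nums[j:j+h]): Python's min() raises only on an empty slice, which the guarded
-- caller never produces, so the `none` arm is unreachable (0 is an arbitrary value).
def pvBlockMin (nums : List Int) (j h : Int) : Int :=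
  match PySem.List.min? (PySem.List.slice nums (some j) (some (j + h))) (fun x => x) with
  | some v => v
  | none => 0

-- B's inner `while j < n` loop over the pairs of adjacent h-blocks; fuel = n, which
-- exceeds the number of steps n//(2h), so the fuel-0 arm is unreachable.
def pvInnerB (nums : List Int) (n h s : Int) : Nat → Int → Bool
  | 0, _ => true
  | fuel + 1, j =>
      if j < n then
        if pvBlockMin nums j h + pvBlockMin nums (j + h) h ≠ s then false
        else pvInnerB nums n h s fuel (j + 2 * h)
      else true

-- B's outer `while h < n` loop doubling the block size; fuel = n ≥ log₂ n rounds.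
def pvOuterB (nums : List Int) (n : Int) : Nat → Int → Bool
  | 0, _ => true
  | fuel + 1, h =>
      if h < n then
        if pvInnerB nums n h (PySem.Int.floordiv n h + 1) nums.length 0 then
          pvOuterB nums n fuel (h * 2)
        else false
      else true

def is_valid_draw_alt (nums : List Int) : Bool :=
  if nums.length = 0 ∨ nums.length &&& (nums.length - 1) ≠ 0 then false
  else pvOuterB nums (nums.length : Int) nums.length 1

-- ===== PRECONDITION & SPEC =====
def Spec_is_valid_draw (nums : List Int) (out : Bool) : Prop := out = is_valid_draw_alt nums
instance (nums : List Int) (out : Bool) : Decidable (Spec_is_valid_draw nums out) := by unfold Spec_is_valid_draw; infer_instance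

-- ===== CLAIM (what is proved, stated in full; the proofs are below) =====
def Claim_equal_is_valid_draw : Prop := ∀ (nums : List Int), Dom_is_valid_draw nums → Spec_is_valid_draw nums (is_valid_draw nums)

-- ===== LEMMAS AND PROOFS =====

-- One round of pairing, abstractly: check each consecutive pair's sum, collect the
-- mins; `none` = some check failed.  Used only by the proofs, by neither port.
def pvPairStep (s : Int) : List Int → Option (List Int)
  | a :: b :: rest =>
      if a + b ≠ s then none
      else
        match pvPairStep s rest with
        | none => none
        | some w => some (min a b :: w)
  | [] => some []
  | [_] => none

-- The list of minima of the `c` consecutive h-blocks of nums starting at index j.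
def pvMins (nums : List Int) (j h : Nat) : Nat → List Int
  | 0 => []
  | c + 1 => pvBlockMin nums (j : Int) (h : Int) :: pvMins nums (j + h) h c

-- If n > 0 and n &&& (n-1) = 0 then n is a power of two.
theorem pv_pow2_of_land (n : Nat) : 0 < n → n &&& (n - 1) = 0 → ∃ e, n = 2 ^ e := by
  induction n using Nat.strong_induction_on with
  | _ n ih =>
    intro h0 h
    rcases Nat.lt_or_ge n 2 with h2 | h2
    · exact ⟨0, by omega⟩
    · have hdiv : n / 2 &&& (n - 1) / 2 = 0 := by
        rw [← Nat.and_div_two, h]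
      rcases Nat.even_or_odd n with he | ho
      · rcases he with ⟨k, hk⟩
        have hk1 : (n - 1) / 2 = n / 2 - 1 := by omega
        rw [hk1] at hdiv
        obtain ⟨e, he'⟩ := ih (n / 2) (by omega) (by omega) hdiv
        refine ⟨e + 1, ?_⟩
        rw [pow_succ]
        omega
      · rcases ho with ⟨k, hk⟩
        have hk1 : (n - 1) / 2 = n / 2 := by omega
        rw [hk1, Nat.and_self] at hdiv
        omega

-- lengths
theorem pv_mins_length (nums : List Int) (h : Nat) :
    ∀ (c j : Nat), (pvMins nums j h c).length = c := by
  intro c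
  induction c with
  | zero => intro j; rfl
  | succ c ih => intro j; simp [pvMins, ih]

-- `some` results of the pair walker have half the length of the input.
theorem pv_pairs_len (s : Int) : ∀ (q w : List Int), pvPairStep s q = some w → 2 * w.length = q.length
  | [], w, h => by
    simp [pvPairStep] at h
    simp [h]
  | [x], w, h => by
    simp [pvPairStep] at h
  | a :: b :: rest, w, h => by
    simp only [pvPairStep] at h
    by_cases hs : a + b ≠ s
    · rw [if_pos hs] at h; exact absurd h (by simp)
    · rw [if_neg hs] at h
      cases hp : pvPairStep s rest with
      | none => rw [hp] at h; exact absurd h (by simp)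
      | some w' =>
        rw [hp] at h
        have hw : w = min a b :: w' := by injection h with h'; exact h'.symm
        have := pv_pairs_len s rest w' hp
        subst hw
        simp only [List.length_cons]
        omega

-- One round of A's queue simulation equals the abstract pair walk (with the already-
-- collected winners `acc` sitting at the back of A's queue).
theorem pv_round_eq (s : Int) (k : Nat) :
    ∀ (q acc : List Int), q.length = 2 * k →
      pvRoundA s k (q ++ acc) = (pvPairStep s q).map (fun w => acc ++ w) := by
  induction k with
  | zero =>
    intro q acc hq
    have : q = [] := by cases q <;> simp_all
    subst this
    simp [pvRoundA, pvPairStep]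
  | succ k ih =>
    intro q acc hq
    match q with
    | [] => simp at hq
    | [_] => simp at hq; omega
    | a :: b :: rest =>
      have hrest : rest.length = 2 * k := by simp at hq; omega
      by_cases hs : a + b ≠ s
      · simp [pvRoundA, pvPairStep, hs]
      · simp only [List.cons_append, pvRoundA, pvPairStep, if_neg hs]
        have hassoc : rest ++ acc ++ [min a b] = rest ++ (acc ++ [min a b]) := by
          simp
        rw [hassoc, ih rest (acc ++ [min a b]) hrest]
        cases pvPairStep s rest <;> simp

-- foldl min pushes through an append.
theorem pv_foldl_min_append (t w : List Int) (u v : Int) :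
    (t ++ v :: w).foldl min u = min (t.foldl min u) (w.foldl min v) := by
  rw [List.foldl_append]
  simp only [List.foldl_cons]
  induction w generalizing v with
  | nil => simp
  | cons x xs ih =>
    simp only [List.foldl_cons]
    rw [min_assoc, ih]

-- min of a 2h-block is the min of the two h-half minima (blocks inside the list).
theorem pv_blockmin_double (nums : List Int) (j h : Nat) (hh : 0 < h)
    (hle : j + 2 * h ≤ nums.length) :
    pvBlockMin nums (j : Int) (2 * h : Nat) =
      min (pvBlockMin nums (j : Int) (h : Int)) (pvBlockMin nums ((j + h : Nat) : Int) (h : Int)) := by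
  have e1 : ((j : Int) + (h : Int)) = ((j + h : Nat) : Int) := by push_cast; ring
  have e2 : ((j : Int) + ((2 * h : Nat) : Int)) = ((j + 2 * h : Nat) : Int) := by push_cast; ring
  have e3 : (((j + h : Nat) : Int) + (h : Int)) = ((j + h + h : Nat) : Int) := by push_cast; ring
  unfold pvBlockMin
  rw [e1, e2, e3,
    PySem.List.slice_natCast, PySem.List.slice_natCast, PySem.List.slice_natCast]
  have h1 : j + 2 * h - j = 2 * h := by omega
  have h2 : j + h - j = h := by omega
  have h3 : j + h + h - (j + h) = h := by omega
  rw [h1, h2, h3]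
  -- split the 2h-take into two h-takes
  have hsplit : (nums.drop j).take (2 * h) =
      (nums.drop j).take h ++ ((nums.drop (j + h)).take h) := by
    rw [two_mul, List.take_add]
    congr 1
    rw [List.drop_drop]
  rw [hsplit]
  have hlen1 : ((nums.drop j).take h).length = h := by
    simp [List.length_take, List.length_drop]; omega
  have hlen2 : ((nums.drop (j + h)).take h).length = h := by
    simp [List.length_take, List.length_drop]; omega
  obtain ⟨u, t, hut⟩ : ∃ u t, (nums.drop j).take h = u :: t := by
    cases hq : (nums.drop j).take h with
    | nil => rw [hq] at hlen1; simp at hlen1; omega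
    | cons u t => exact ⟨u, t, rfl⟩
  obtain ⟨v, w, hvw⟩ : ∃ v w, (nums.drop (j + h)).take h = v :: w := by
    cases hq : (nums.drop (j + h)).take h with
    | nil => rw [hq] at hlen2; simp at hlen2; omega
    | cons v w => exact ⟨v, w, rfl⟩
  rw [hut, hvw]
  rw [PySem.List.min?_id_cons, PySem.List.min?_id_cons]
  have : (u :: t ++ v :: w) = u :: (t ++ v :: w) := by simp
  rw [this, PySem.List.min?_id_cons]
  simp only
  rw [pv_foldl_min_append]

-- B's inner loop over the pairs of h-blocks IS the abstract pair walk on the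
-- block-minima list: it succeeds exactly when pvPairStep does, whose result is then
-- the (2h)-block minima list.
theorem pv_inner_eq (nums : List Int) (h : Nat) (s : Int) (hh : 0 < h) :
    ∀ (c : Nat) (j fuel : Nat), c ≤ fuel → j + 2 * h * c = nums.length →
      pvPairStep s (pvMins nums j h (2 * c)) =
        if pvInnerB nums (nums.length : Int) (h : Int) s fuel (j : Int) then
          some (pvMins nums j (2 * h) c)
        else none := by
  intro c
  induction c with
  | zero =>
    intro j fuel _ hj
    have hjn : ¬ ((j : Int) < (nums.length : Int)) := by
      omega
    have : pvInnerB nums (nums.length : Int) (h : Int) s fuel (j : Int) = true := by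
      cases fuel with
      | zero => rfl
      | succ f => simp [pvInnerB, hjn]
    rw [this]
    simp [pvMins, pvPairStep]
  | succ c ih =>
    intro j fuel hf hj
    obtain ⟨f, rfl⟩ : ∃ f, fuel = f + 1 := ⟨fuel - 1, by omega⟩
    have hexp : 2 * h * (c + 1) = 2 * h + 2 * h * c := by ring
    have hmul : 2 * h ≤ 2 * h * (c + 1) := Nat.le_mul_of_pos_right _ (by omega)
    have hjlt : j < nums.length := by omega
    have hjn : ((j : Int) < (nums.length : Int)) := by exact_mod_cast hjlt
    have e1 : ((j : Int) + (h : Int)) = ((j + h : Nat) : Int) := by push_cast; ring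
    have e2 : ((j : Int) + 2 * (h : Int)) = ((j + 2 * h : Nat) : Int) := by push_cast; ring
    have hmins : pvMins nums j h (2 * (c + 1)) =
        pvBlockMin nums (j : Int) (h : Int) ::
          pvBlockMin nums ((j + h : Nat) : Int) (h : Int) :: pvMins nums (j + 2 * h) h (2 * c) := by
      have hcc : 2 * (c + 1) = (2 * c) + 1 + 1 := by omega
      have h2 : j + h + h = j + 2 * h := by omega
      rw [hcc]
      simp only [pvMins]
      rw [h2]
    have hmin : min (pvBlockMin nums (j : Int) (h : Int)) (pvBlockMin nums ((j + h : Nat) : Int) (h : Int)) =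
        pvBlockMin nums (j : Int) ((2 * h : Nat) : Int) := by
      rw [pv_blockmin_double nums j h hh (by omega)]
    have hnext : pvMins nums j (2 * h) (c + 1) =
        pvBlockMin nums (j : Int) ((2 * h : Nat) : Int) :: pvMins nums (j + 2 * h) (2 * h) c := by
      simp [pvMins]
    rw [hmins]
    simp only [pvInnerB, if_pos hjn, e1]
    by_cases hs : pvBlockMin nums (j : Int) (h : Int) + pvBlockMin nums ((j + h : Nat) : Int) (h : Int) ≠ s
    · rw [if_pos hs]
      simp only [pvPairStep, if_pos hs]
      simp
    · rw [if_neg hs]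
      simp only [pvPairStep, if_neg hs]
      rw [e2, ih (j + 2 * h) f (by omega) (by omega)]
      by_cases hb : pvInnerB nums (nums.length : Int) (h : Int) s f ((j + 2 * h : Nat) : Int)
      · rw [if_pos hb, if_pos hb]
        simp only [Option.some.injEq]
        rw [hmin, hnext]
      · rw [if_neg hb, if_neg hb]

-- the h = 1 minima list is nums itself.
theorem pv_mins_one (nums : List Int) :
    ∀ (c j : Nat), j + c = nums.length → pvMins nums j 1 c = nums.drop j := by
  intro c
  induction c with
  | zero =>
    intro j hj
    simp only [pvMins]
    rw [List.drop_of_length_le (by omega)]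
  | succ c ih =>
    intro j hj
    have hjlt : j < nums.length := by omega
    have hbm : pvBlockMin nums (j : Int) ((1 : Nat) : Int) = nums[j] := by
      unfold pvBlockMin
      have ecast : ((j : Int) + ((1 : Nat) : Int)) = ((j + 1 : Nat) : Int) := by
        push_cast; ring
      have htake : List.take 1 (List.drop j nums) = [nums[j]] := by
        rw [List.drop_eq_getElem_cons hjlt, List.take_succ_cons, List.take_zero]
      rw [ecast, PySem.List.slice_natCast, (by omega : j + 1 - j = 1), htake,
        PySem.List.min?_id_cons]
      simp
    simp only [pvMins]
    rw [hbm, ih (j + 1) (by omega), List.drop_eq_getElem_cons hjlt]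

-- A's while loop on the block-minima list equals B's outer doubling loop.
theorem pv_outer_eq (nums : List Int) (e : Nat) (hn : nums.length = 2 ^ e) :
    ∀ (fuel d : Nat), d ≤ e →
      pvWhileA fuel (pvMins nums 0 (2 ^ d) (2 ^ (e - d))) =
        pvOuterB nums (nums.length : Int) fuel ((2 ^ d : Nat) : Int) := by
  intro fuel
  induction fuel with
  | zero => intro d _; rfl
  | succ f ih =>
    intro d hd
    by_cases hde : d = e
    · subst hde
      have hlen1 : (pvMins nums 0 (2 ^ d) 1).length = 1 := pv_mins_length nums (2 ^ d) 1 0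
      have hle : ((nums.length : Int)) ≤ (2 : Int) ^ d := by
        rw [hn]; push_cast; simp
      simp [pvWhileA, pvOuterB, hlen1, hle]
    · have hdlt : d < e := by omega
      have hpow : 1 ≤ 2 ^ (e - d - 1) := Nat.one_le_two_pow
      have hed : e - d = (e - d - 1) + 1 := by omega
      have hcnt : 2 ^ (e - d) = 2 * 2 ^ (e - d - 1) := by
        rw [← pow_succ']
        congr 1
      have hLlen : (pvMins nums 0 (2 ^ d) (2 ^ (e - d))).length = 2 ^ (e - d) :=
        pv_mins_length nums (2 ^ d) _ 0
      have hgt : (pvMins nums 0 (2 ^ d) (2 ^ (e - d))).length > 1 := by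
        rw [hLlen]; omega
      have hhalf : (pvMins nums 0 (2 ^ d) (2 ^ (e - d))).length / 2 = 2 ^ (e - d - 1) := by
        rw [hLlen]; omega
      have hlt : (((2 ^ d : Nat) : Int) < (nums.length : Int)) := by
        rw [hn]; exact_mod_cast Nat.pow_lt_pow_right (by omega) hdlt
      have hfl : PySem.Int.floordiv (nums.length : Int) ((2 ^ d : Nat) : Int) + 1 =
          ((pvMins nums 0 (2 ^ d) (2 ^ (e - d))).length : Int) + 1 := by
        rw [hn, PySem.Int.floordiv_natCast, hLlen]
        congr 2
        rw [Nat.pow_div hdlt.le (by omega)]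
      have hinner := pv_inner_eq nums (2 ^ d)
        (((pvMins nums 0 (2 ^ d) (2 ^ (e - d))).length : Int) + 1) (by positivity)
        (2 ^ (e - d - 1)) 0 nums.length
        (by rw [hn]; exact Nat.pow_le_pow_right (by omega) (by omega))
        (by
          have hmm : 2 * 2 ^ d * 2 ^ (e - d - 1) = 2 ^ d * 2 ^ (e - d) := by
            rw [hcnt]; ring
          have hnn : 2 ^ d * 2 ^ (e - d) = nums.length := by
            rw [hn, ← pow_add]
            congr 1
            omega
          omega)
      rw [← hcnt] at hinner
      simp only [Nat.cast_zero] at hinner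
      have hround := pv_round_eq
        (((pvMins nums 0 (2 ^ d) (2 ^ (e - d))).length : Int) + 1)
        (2 ^ (e - d - 1)) (pvMins nums 0 (2 ^ d) (2 ^ (e - d))) []
        (by rw [hLlen, hcnt])
      rw [List.append_nil] at hround
      simp only [pvWhileA, pvOuterB, if_pos hgt, if_pos hlt, hhalf]
      rw [hround, hfl, hinner]
      by_cases hb : pvInnerB nums (nums.length : Int) ((2 ^ d : Nat) : Int)
          (((pvMins nums 0 (2 ^ d) (2 ^ (e - d))).length : Int) + 1) nums.length 0
      · rw [if_pos hb, if_pos hb]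
        simp only [Option.map_some, List.nil_append]
        have hc2 : 2 * 2 ^ d = 2 ^ (d + 1) := by rw [pow_succ]; ring
        have hcast : ((2 ^ d : Nat) : Int) * 2 = ((2 ^ (d + 1) : Nat) : Int) := by
          push_cast [pow_succ]; ring
        have hidx : e - d - 1 = e - (d + 1) := by omega
        rw [hc2, hcast, hidx]
        exact ih (d + 1) (by omega)
      · rw [if_neg hb, if_neg hb]
        simp

-- ===== VERDICT (by name: the statement is the Claim_ definition above) =====
theorem is_valid_draw_spec : Claim_equal_is_valid_draw := by
  intro nums _
  unfold Spec_is_valid_draw is_valid_draw is_valid_draw_alt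
  by_cases hg : nums.length = 0 ∨ nums.length &&& (nums.length - 1) ≠ 0
  · rw [if_pos hg, if_pos hg]
  · rw [if_neg hg, if_neg hg]
    have h0 : nums.length ≠ 0 := fun h => hg (Or.inl h)
    have hl : nums.length &&& (nums.length - 1) = 0 := by
      by_contra h; exact hg (Or.inr h)
    obtain ⟨e, he⟩ := pv_pow2_of_land _ (Nat.pos_of_ne_zero h0) hl
    have h1 := pv_outer_eq nums e he nums.length 0 (Nat.zero_le e)
    simp only [pow_zero, Nat.sub_zero] at h1
    rw [pv_mins_one nums (2 ^ e) 0 (by simp [he])] at h1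
    simpa using h1
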